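/-
  LEMMAS FOR THE WORKERS OF vorbis_decode_packet_rest's SEGMENTS (and of its caller): what the function's footprint is made of.
  (How the invariant `DecodeInv` is carried — `DecodeInv.frame_stores`, `.global_kept`, `.tables_kept`, `.withEnv`, `.push`, `.carry` —
  is in Vorbis/Spec/DecodeInv.lean.)

      Covered, covered_footprint             the bytes the function may write; the `hsub` of `Mem.SameExcept.step_same` when `Frame.same` is extended
      footprint_storeOK      every span of the function's footprint is `StoreOK` for the entry memory: with `Frame.same`, the CONFIG part at any cut
                             point reads as at the entry; a caller carries its own invariant over the call
      framesIn_sub           the `hsub` of `DecodeInv.push` for the function's own frame list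
      SpanOK, SpanOK.below / .of_winsBits / .finalY / .chan      where a span written between two cut points may lie (stack scratch, the bit reader's windows of `*f`,
                             `finalY[c]`, `channel_buffers[c]`) and its constructors; SpanOK.geom, SpanOK.geom_obj: the geometry as one fact for `omega`
      Stable.carry           STABLE (all of `Frame` and the eleven slot facts) of the new memory after a batch of `SpanOK` stores: the lemma for EVERY exit and every
                             callee return of segments .2 – .8, .10, .11; Stable.same_mem: the same when nothing was stored
      config_carry, reads_carry, mode_record_inside, carry_read, carry_eqOn, carry_eqOn_prot, Protected
                             the other clauses of an exit assertion over the same stores: `channels`, `nOf`, `mapOf`, `finalY[c]`, `IsFloor`, the floor block's contents, a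
                             protected stack range; toNat_entry_sub, toNat_slot: stack addresses as numbers
      CallSpanOK, Stable.after_call          STABLE after a callee whose post hands the shadow layer and `DecodeInv` back (decode_residue .9, inverse_mdct .12,
                             flush_packet .13): everything else of `Stable` from the geometry of the written spans; config_of_objEq, entry_objEq: `n`, `map`, the
                             channel count read as at the entry in every memory of `Frame.same`
  How to use them: farm/hints/vorbis_decode_packet_rest.md.
-/
import Vorbis.Spec.PacketRest
import Vorbis.Spec.Reader
namespace Vorbis.Spec.vorbis_decode_packet_rest
open X86 X86.User Asan Vorbis Vorbis.Spec

variable {others : List Obj} {frames : List (Nat × FrameLayout)} {len : Nat} {Ar : Arena} {stored room : Int}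
  {ysz : Nat → Nat} {mem mem' : Mem} {f : Nat}

/- `DecodeInv.frame_stores` (THE DECODE-TIME FRAME), `DecodeInv.global_kept`, `DecodeInv.tables_kept`, `runBlk_global`,
`range_list_global`, `log2_4_global`: Vorbis/Spec/DecodeInv.lean (they are about the one decode-time invariant, not about this
function). -/

/-! ### The function's footprint: what lies in it, and that every span of it is a decode-time store -/

/-- **The byte `a` is one the function may write**: in its stack area, a hole of `*f`, a `finalY` or channel buffer block, the free
gap of the arena, the dwords at `len` / `p_left`, or the shadow of the stack area / of the gap. The disjunction a worker picks from
when it extends `Frame.same` by the stores of its segment (`Mem.SameExcept.step_same … (fun w hw a h1 h2 => covered_footprint …)`). -/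
def Covered (Ar : Arena) (ysz : Nat → Nat) (u : State) (a : Nat) : Prop :=
  ((u.reg .rsp).toNat - 3856 ≤ a ∧ a < (u.reg .rsp).toNat) ∨
  (∃ s, s ∈ holes (fOf u) ∧ s.lo ≤ a ∧ a < s.hi) ∨
  (∃ c, c < nchan u.mem (fOf u) ∧ stb_vorbis.finalY u.mem (fOf u) c ≤ a ∧ a < stb_vorbis.finalY u.mem (fOf u) c + ysz c) ∨
  (∃ c, c < nchan u.mem (fOf u) ∧ stb_vorbis.channel_buffers u.mem (fOf u) c ≤ a ∧
    a < stb_vorbis.channel_buffers u.mem (fOf u) c + 4 * bsize u.mem (fOf u) 1) ∨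
  (Ar.B + Ar.S ≤ a ∧ a < Ar.B + Ar.L) ∨
  (lenOf u ≤ a ∧ a < lenOf u + 4) ∨
  (pLeftOf u ≤ a ∧ a < pLeftOf u + 4) ∨
  ((shadowSpan ((u.reg .rsp).toNat - 3856) (u.reg .rsp).toNat).lo ≤ a ∧
    a < (shadowSpan ((u.reg .rsp).toNat - 3856) (u.reg .rsp).toNat).hi) ∨
  ((shadowSpan (Ar.B + Ar.S) (Ar.B + Ar.L)).lo ≤ a ∧ a < (shadowSpan (Ar.B + Ar.S) (Ar.B + Ar.L)).hi)

/-- **A covered byte lies in a span of the function's footprint.** -/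
theorem covered_footprint (others : List Obj) (frames : List (Nat × FrameLayout)) (len : Nat) (Ar : Arena)
    (stored room : Int) (mode : Nat) (ysz : Nat → Nat) (u : State) (a : Nat) (h : Covered Ar ysz u a) :
    ∃ w', w' ∈ (vorbis_decode_packet_rest.spec others frames len Ar stored room mode ysz).footprint u ∧
      w'.lo ≤ a ∧ a < w'.hi := by
  unfold Spec.footprint
  show ∃ w', w' ∈ (⟨(u.reg .rsp).toNat - 3856, (u.reg .rsp).toNat⟩ : Span) :: writes Ar ysz u ∧ w'.lo ≤ a ∧ a < w'.hi
  rcases h with h | ⟨s, hs, h1, h2⟩ | ⟨c, hc, h1, h2⟩ | ⟨c, hc, h1, h2⟩ | h | h | h | h | h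
  · exact ⟨⟨(u.reg .rsp).toNat - 3856, (u.reg .rsp).toNat⟩, List.mem_cons_self, h.1, h.2⟩
  · refine ⟨s, List.mem_cons_of_mem _ ?_, h1, h2⟩
    unfold writes
    exact List.mem_append_left _ (List.mem_append_left _ (List.mem_append_left _ hs))
  · refine ⟨⟨stb_vorbis.finalY u.mem (fOf u) c, stb_vorbis.finalY u.mem (fOf u) c + ysz c⟩, List.mem_cons_of_mem _ ?_, h1, h2⟩
    unfold writes
    apply List.mem_append_left
    apply List.mem_append_left
    apply List.mem_append_right
    exact List.mem_map.mpr ⟨c, List.mem_range.mpr hc, rfl⟩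
  · refine ⟨⟨stb_vorbis.channel_buffers u.mem (fOf u) c,
      stb_vorbis.channel_buffers u.mem (fOf u) c + 4 * bsize u.mem (fOf u) 1⟩, List.mem_cons_of_mem _ ?_, h1, h2⟩
    unfold writes
    apply List.mem_append_left
    apply List.mem_append_right
    exact List.mem_map.mpr ⟨c, List.mem_range.mpr hc, rfl⟩
  · refine ⟨⟨Ar.B + Ar.S, Ar.B + Ar.L⟩, List.mem_cons_of_mem _ ?_, h.1, h.2⟩
    unfold writes
    apply List.mem_append_right
    exact List.mem_cons_self
  · refine ⟨⟨lenOf u, lenOf u + 4⟩, List.mem_cons_of_mem _ ?_, h.1, h.2⟩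
    unfold writes
    apply List.mem_append_right
    exact List.mem_cons_of_mem _ List.mem_cons_self
  · refine ⟨⟨pLeftOf u, pLeftOf u + 4⟩, List.mem_cons_of_mem _ ?_, h.1, h.2⟩
    unfold writes
    apply List.mem_append_right
    exact List.mem_cons_of_mem _ (List.mem_cons_of_mem _ List.mem_cons_self)
  · refine ⟨shadowSpan ((u.reg .rsp).toNat - 3856) (u.reg .rsp).toNat, List.mem_cons_of_mem _ ?_, h.1, h.2⟩
    unfold writes
    apply List.mem_append_right
    exact List.mem_cons_of_mem _ (List.mem_cons_of_mem _ (List.mem_cons_of_mem _ List.mem_cons_self))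
  · refine ⟨shadowSpan (Ar.B + Ar.S) (Ar.B + Ar.L), List.mem_cons_of_mem _ ?_, h.1, h.2⟩
    unfold writes
    apply List.mem_append_right
    exact List.mem_cons_of_mem _ (List.mem_cons_of_mem _ (List.mem_cons_of_mem _ (List.mem_cons_of_mem _ List.mem_cons_self)))

/-- **Every span of the function's footprint is a decode-time store** (`StoreOK` for the ENTRY memory): the stack area, the two
callers' objects and the arena's free gap are off every allocated block (`DecodeInv.offStack`, `DecodeInv.offGap`), the shadow lies above
C00000H where no allocated block is (`BlkOK.inside`), the holes are holes, the buffers are sample buffers. Hence, with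
`Frame.same`, the CONFIG part of the invariant at ANY cut point reads as at the function's entry (`ConfigOK.frame_stores`,
`DecodeInv.frame_stores`: `DecodeSame f u.mem v.mem`, the configuration blocks kept) — and a caller carries its own invariant over the call. -/
theorem footprint_storeOK {others : List Obj} {frames : List (Nat × FrameLayout)} {len : Nat} {Ar : Arena}
    {stored room : Int} {mode : Nat} {ysz : Nat → Nat} {u : State}
    (hpre : (vorbis_decode_packet_rest.spec others frames len Ar stored room mode ysz).pre u)
    (hroom : 0x700000 + 3856 ≤ (u.reg .rsp).toNat) (s : Span)
    (hs : s ∈ (vorbis_decode_packet_rest.spec others frames len Ar stored room mode ysz).footprint u) :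
    StoreOK (RunBlk Ar len) u.mem (fOf u) s := by
  obtain ⟨hsh, hinv, hargs⟩ := hpre
  have hsp := hsh.rsp
  have hins := hinv.fb.env.ok.inside
  have hcfg := Real.VorbisOK.config hinv.fb.vorbis
  have hshadow : ∀ lo hi : Nat, StoreOK (RunBlk Ar len) u.mem (fOf u) (shadowSpan lo hi) := by
    intro lo hi
    apply StoreOK.off
    intro B hB
    have := hins B hB
    unfold shadowSpan
    simp only []
    omega
  have hmem : s ∈ (⟨(u.reg .rsp).toNat - 3856, (u.reg .rsp).toNat⟩ : Span) :: writes Ar ysz u := hs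
  rcases List.mem_cons.mp hmem with rfl | hw
  · apply StoreOK.off
    intro B hB
    have := hinv.offStack B hB
    simp only []
    omega
  · unfold writes at hw
    rcases List.mem_append.mp hw with hw | hw
    · rcases List.mem_append.mp hw with hw | hw
      · rcases List.mem_append.mp hw with hw | hw
        · exact StoreOK.hole (holes_inHole _ s hw)
        · obtain ⟨c, hc, rfl⟩ := List.mem_map.mp hw
          have hc' : (c : Int) < stb_vorbis.channels u.mem (fOf u) := by
            have := List.mem_range.mp hc
            unfold nchan at this
            omega
          have hb := (hinv.fy c hc').1
          exact StoreOK.buffer _ (SampleBuf.finalY c hc' (ysz c) hb) (Nat.le_refl _) (Nat.le_refl _)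
      · obtain ⟨c, hc, rfl⟩ := List.mem_map.mp hw
        have hc' : (c : Int) < stb_vorbis.channels u.mem (fOf u) := by
          have := List.mem_range.mp hc
          unfold nchan at this
          omega
        exact StoreOK.buffer _ (SampleBuf.chan c hc') (Nat.le_refl _) (Nat.le_refl _)
    · simp only [List.mem_cons, List.mem_nil_iff, or_false] at hw
      rcases hw with rfl | rfl | rfl | rfl | rfl
      · apply StoreOK.off
        intro B hB
        have := hinv.offGap B hB
        simp only []
        omega
      · apply StoreOK.off
        intro B hB
        have := hinv.offStack B hB
        have := hargs.len_obj.2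
        simp only []
        omega
      · apply StoreOK.off
        intro B hB
        have := hinv.offStack B hB
        have := hargs.left_obj.2
        simp only []
        omega
      · exact hshadow _ _
      · exact hshadow _ _

/-! ### The invariant when the list of active protected frames changes (the prologue, the epilogue) -/

/- `DecodeInv.withEnv` (another list of active frames), `DecodeInv.push` (MORE active frames: after the prologue):
Vorbis/Spec/DecodeInv.lean. -/

/-- The live objects of the caller's frames are live inside the function (`hsub` of `DecodeInv.push` for `framesIn`). -/
theorem framesIn_sub (others : List Obj) (frames : List (Nat × FrameLayout)) (u : State) (o : Obj)
    (ho : o ∈ stackObjs frames ++ others) : o ∈ stackObjs (framesIn frames u) ++ others := by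
  unfold framesIn
  rw [stackObjs_cons]
  rcases List.mem_append.mp ho with hs | hoth
  · exact List.mem_append_left _ (List.mem_append_right _ hs)
  · exact List.mem_append_right _ hoth

/-! ### STABLE over the stores of a segment: `SpanOK`, `Stable.carry`

Every exit of every segment between the prologue and the epilogue (`At2 … At14`, `At16`) contains `Stable` for the memory of the
exit state; so does every cut point at a callee's return. `Stable.carry` rebuilds ALL of it (`Frame.same`, `Frame.inv : DecodeInv`,
`Frame.shadow`, the return address and the six saved registers, the eight STABLE slots, the two stack arguments, `mem32[p_left]`)
from `Stable` at an earlier state `v`, given only WHERE the stores between `v` and the new state `s` went (`SpanOK` per span of a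
`Mem.SameExcept spans v.mem s.mem`, as `u_same` / a callee's `Returned.same` gives it). The companions `config_carry`, `reads_carry`
give the remaining clauses of an exit assertion (`channels`, `mapOf`, `finalY`, `IsFloor`, the floor block's contents).

NOT covered (use `DecodeInv.frame_stores` / `DecodeInv.carry` and `covered_footprint` directly): stores that write shadow bytes (the
prologue .1, the epilogue .15, decode_residue in .9, inverse_mdct in .12), the arena's free gap (.9, .12), the dwords at `len` /
`p_left` and the slot `[0x78]` (.13, .14), holes of `*f` other than the bit reader's windows (`error`, flush_packet: .13, .14, .16). -/

/-- **Where a span written between two cut points may lie** (`R` = the ENTRY rsp `(e.reg .rsp).toNat`, `f = fOf e`, `mem` = the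
memory at the EARLIER cut point, where `Stable` is known). Four disjuncts, in this order:

1. STACK: in the function's stack area `[R − 3856, R − 48)` (below the saved registers) and off the STABLE slots — i.e. below the
   slot `[0x3c]` (`w.hi ≤ R − 2940`: the return address `[R − 3008, R − 3000)` of a check call or of a callee, every scratch slot
   `[0x0, 0x3c)` of the steady rsp `R − 3000`, the callee's own frame), in the scratch slots `[0x48, 0x50)` (`R − 2928 ≤ lo, hi ≤ R − 2920`),
   in `[0x54, 0x60)` (`R − 2916 ≤ lo, hi ≤ R − 2904`), or in the frame objects `[0x80, …)` (`R − 2872 ≤ lo`: `residue_buffers`,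
   `step2_flag`, `zero_channel`, `really_zero_channel`). `Or.inl ⟨_, _, Or.inl _⟩` etc., each closed by `simp only []; omega`
   (or `u_omega`).
2. WINDOW: inside one of the bit reader's windows of `*f` (`Reader.winsBits f`, the `writes` of get_bits, get8_packet_raw,
   codebook_decode_scalar_raw …): `SpanOK.of_winsBits`.
3. FINALY: a non-empty span inside the block at `finalY[c]`, `c < channels` (`ysz c` bytes: `DecodeInv.fy`): `SpanOK.finalY`.
4. CHAN: a non-empty span inside the block at `channel_buffers[c]`, `c < channels` (`4·b1` bytes): `SpanOK.chan`. -/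
def SpanOK (ysz : Nat → Nat) (mem : Mem) (R f : Nat) (w : Span) : Prop :=
  (R - 3856 ≤ w.lo ∧ w.hi ≤ R - 48 ∧
    (w.hi ≤ R - 2940 ∨ (R - 2928 ≤ w.lo ∧ w.hi ≤ R - 2920) ∨ (R - 2916 ≤ w.lo ∧ w.hi ≤ R - 2904) ∨ R - 2872 ≤ w.lo)) ∨
  ((f + 48 ≤ w.lo ∧ w.hi ≤ f + 56) ∨ (f + 84 ≤ w.lo ∧ w.hi ≤ f + 96) ∨ (f + 136 ≤ w.lo ∧ w.hi ≤ f + 144) ∨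
    (f + 1484 ≤ w.lo ∧ w.hi ≤ f + 1784)) ∨
  (∃ c : Nat, (c : Int) < stb_vorbis.channels mem f ∧ stb_vorbis.finalY mem f c ≤ w.lo ∧ w.lo < w.hi ∧
    w.hi ≤ stb_vorbis.finalY mem f c + ysz c) ∨
  (∃ c : Nat, (c : Int) < stb_vorbis.channels mem f ∧ stb_vorbis.channel_buffers mem f c ≤ w.lo ∧ w.lo < w.hi ∧
    w.hi ≤ stb_vorbis.channel_buffers mem f c + 4 * bsize mem f 1)

/-- **`SpanOK` of a scratch store below the STABLE slots** (disjunct 1, first arm): the return address of a check call or of a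
callee at `[R − 3008, R − 3000)`, a scratch slot `[rsp + off]` with `off + n ≤ 0x3c`, a callee's frame. Usage:
`SpanOK.below (by simp only []; omega) (by simp only []; omega)`. -/
theorem SpanOK.below {R : Nat} {w : Span} (h1 : R - 3856 ≤ w.lo) (h2 : w.hi ≤ R - 2940) : SpanOK ysz mem R f w :=
  Or.inl ⟨h1, by omega, Or.inl h2⟩

/-- **`SpanOK` of a span inside the block at `finalY[c]`** (disjunct 3): the stores `finalY[k] = …` of segments .2, .4, .5, .6
(`w = ⟨finalY + 2·k, finalY + 2·k + 2⟩`; `2·k + 2 ≤ ysz c` from `DecodeInv.fy` and FL8 `2 ≤ values`). -/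
theorem SpanOK.finalY {R : Nat} {w : Span} (c : Nat) (hc : (c : Int) < stb_vorbis.channels mem f)
    (h1 : stb_vorbis.finalY mem f c ≤ w.lo) (h2 : w.lo < w.hi) (h3 : w.hi ≤ stb_vorbis.finalY mem f c + ysz c) :
    SpanOK ysz mem R f w :=
  Or.inr (Or.inr (Or.inl ⟨c, hc, h1, h2, h3⟩))

/-- **`SpanOK` of a span inside the block at `channel_buffers[c]`** (disjunct 4): the stores of the inverse coupling (.10), the
footprint of memset / do_floor (.11: `target[0 .. n/2)`). -/
theorem SpanOK.chan {R : Nat} {w : Span} (c : Nat) (hc : (c : Int) < stb_vorbis.channels mem f)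
    (h1 : stb_vorbis.channel_buffers mem f c ≤ w.lo) (h2 : w.lo < w.hi)
    (h3 : w.hi ≤ stb_vorbis.channel_buffers mem f c + 4 * bsize mem f 1) : SpanOK ysz mem R f w :=
  Or.inr (Or.inr (Or.inr ⟨c, hc, h1, h2, h3⟩))

/-- **`SpanOK` of the bit reader's footprint** (disjunct 2): every span of `Reader.winsBits f` — the `writes` of `get_bits.spec24`,
and a superset of those of the other readers the function calls. At a callee's return (`v_returned` gives
`Mem.SameExcept (stack window :: Reader.winsBits f) …`): the head by `SpanOK.below`, the tail by this lemma. -/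
theorem SpanOK.of_winsBits {R : Nat} {w : Span} (h : w ∈ Reader.winsBits f) : SpanOK ysz mem R f w := by
  simp only [Reader.winsBits, List.mem_cons, List.mem_nil_iff, or_false] at h
  refine Or.inr (Or.inl ?_)
  rcases h with rfl | rfl | rfl | rfl | rfl <;> simp only [] <;> omega

/-- **The geometry of a `SpanOK` span**, from the decode-time invariant of the memory `mem` and the position `R` of the entry
stack pointer (`hR1 = Frame.entry.room`, `hR2 = Frame.entry.top`): it is a decode-time store (`StoreOK`: the `hw` of
`DecodeInv.frame_stores`); it lies in the function's stack area, in a reader window of `*f`, or in a sample buffer — an ARENA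
setup block, hence off `*f`, below 2^64, and off the stack region INCLUDING the two stack arguments `[R + 8, R + 24)`:
`0x800020 ≤ w.lo` (`ArenaOK.block_range`: a block starts 32 bytes above the arena's base, AR1x: the base is `≥ 0x800000`; the
entry assertion only gives `R + 8 ≤ 0x800000`, so "above the stack region" alone would NOT protect `Stable.arg_re` / `arg_left`).
The same for `*f` itself (last conjunct). One arithmetic fact for `omega`: use it when you need a read the lemmas below do not
cover. -/
theorem SpanOK.geom (h : DecodeInv others frames len Ar stored room ysz mem f) {R : Nat} {w : Span}
    (hR1 : 0x700000 + 3856 ≤ R) (hR2 : R + 8 ≤ 0x800000) (hw : SpanOK ysz mem R f w) :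
    StoreOK (RunBlk Ar len) mem f w ∧
    ((R - 3856 ≤ w.lo ∧ w.hi ≤ R - 48 ∧
        (w.hi ≤ R - 2940 ∨ (R - 2928 ≤ w.lo ∧ w.hi ≤ R - 2920) ∨ (R - 2916 ≤ w.lo ∧ w.hi ≤ R - 2904) ∨ R - 2872 ≤ w.lo)) ∨
      ((f + 48 ≤ w.lo ∧ w.hi ≤ f + 56) ∨ (f + 84 ≤ w.lo ∧ w.hi ≤ f + 96) ∨ (f + 136 ≤ w.lo ∧ w.hi ≤ f + 144) ∨
        (f + 1484 ≤ w.lo ∧ w.hi ≤ f + 1784)) ∨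
      ((w.hi ≤ f ∨ f + 1808 ≤ w.lo) ∧ (w.hi ≤ 0x700000 ∨ 0x800020 ≤ w.lo) ∧ w.hi ≤ 0xC00000 ∧ Vorbis.L.textHi ≤ w.lo ∧
        ((∃ c : Nat, (c : Int) < stb_vorbis.channels mem f ∧ stb_vorbis.finalY mem f c ≤ w.lo ∧ w.lo < w.hi ∧
            w.hi ≤ stb_vorbis.finalY mem f c + ysz c) ∨
          (∃ c : Nat, (c : Int) < stb_vorbis.channels mem f ∧ stb_vorbis.channel_buffers mem f c ≤ w.lo ∧ w.lo < w.hi ∧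
            w.hi ≤ stb_vorbis.channel_buffers mem f c + 4 * bsize mem f 1)))) ∧
    (f + 1808 ≤ 0x700000 ∨ 0x800020 ≤ f) := by
  have hA := h.arena
  have hfr := hA.block_range (p := f) (n := Off.sizeof.stb_vorbis) h.obj
  have hl := le_r8 Off.sizeof.stb_vorbis
  simp only [voff] at hfr hl
  have h1 := hA.AR1
  have h1x := hA.AR1x
  have h2 := hA.AR2
  have htext := h.arenaText
  have hoffS := h.offStack
  have hf : f + 1808 ≤ 0x700000 ∨ 0x800020 ≤ f := by omega
  -- a non-empty span inside a sample buffer `C`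
  have hbuf : ∀ C : Block, SampleBuf (RunBlk Ar len) mem f C → C.base ≤ w.lo → w.lo < w.hi → w.hi ≤ C.base + C.size →
      (w.hi ≤ f ∨ f + 1808 ≤ w.lo) ∧ (w.hi ≤ 0x700000 ∨ 0x800020 ≤ w.lo) ∧ w.hi ≤ 0xC00000 ∧ Vorbis.L.textHi ≤ w.lo := by
    intro C hC k1 k2 k3
    have hd := h.sep.bufobj C hC
    simp only [vblock, voff] at hd
    rcases h.buf C hC with h0 | hb
    · omega
    · have hr := hA.block_range (p := C.base) (n := C.size) hb
      have hl' := le_r8 C.size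
      omega
  refine ⟨?_, ?_, hf⟩
  · rcases hw with hs | hh | ⟨c, hc, k1, k2, k3⟩ | ⟨c, hc, k1, k2, k3⟩
    · apply StoreOK.off
      intro B hB
      have := hoffS B hB
      omega
    · apply StoreOK.hole
      unfold InHole
      omega
    · exact StoreOK.buffer _ (SampleBuf.finalY c hc (ysz c) (h.fy c hc).1) k1 k3
    · exact StoreOK.buffer _ (SampleBuf.chan c hc) k1 k3
  · rcases hw with hs | hh | ⟨c, hc, k1, k2, k3⟩ | ⟨c, hc, k1, k2, k3⟩
    · exact Or.inl hs
    · exact Or.inr (Or.inl hh)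
    · obtain ⟨g1, g2, g3, g4⟩ := hbuf _ (SampleBuf.finalY c hc (ysz c) (h.fy c hc).1) k1 k2 k3
      exact Or.inr (Or.inr ⟨g1, g2, g3, g4, Or.inl ⟨c, hc, k1, k2, k3⟩⟩)
    · obtain ⟨g1, g2, g3, g4⟩ := hbuf _ (SampleBuf.chan c hc) k1 k2 k3
      exact Or.inr (Or.inr ⟨g1, g2, g3, g4, Or.inr ⟨c, hc, k1, k2, k3⟩⟩)

/-- **Where `*f` lies**: a setup block of the arena — off the stack region and off the two stack arguments (`0x800020 ≤ f`, see
`SpanOK.geom`), below C00000H. Restate it over `(e.reg .rdi).toNat` before a walk (`fOf e` is an abbrev the walker's disjointness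
search does not unfold): `have hfoff : (e.reg .rdi).toNat + 1808 ≤ 0x700000 ∨ 0x800020 ≤ (e.reg .rdi).toNat := (SpanOK.geom_obj hat.inv he_top).1`. -/
theorem SpanOK.geom_obj (h : DecodeInv others frames len Ar stored room ysz mem f) {R : Nat} (hR2 : R + 8 ≤ 0x800000) :
    (f + 1808 ≤ 0x700000 ∨ 0x800020 ≤ f) ∧ f + 1808 ≤ 0xC00000 := by
  have hA := h.arena
  have hfr := hA.block_range (p := f) (n := Off.sizeof.stb_vorbis) h.obj
  have hl := le_r8 Off.sizeof.stb_vorbis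
  simp only [voff] at hfr hl
  have h1x := hA.AR1x
  have h2 := hA.AR2
  have hin := h.ok.inside _ h.ob1
  simp only [vblock, voff] at hin
  omega

/-- **A range that no `SpanOK` store meets** (`R` = the entry rsp): a STABLE slot (`[0x3c, 0x48)`, `[0x50, 0x54)`, `[0x60, 0x80)` of
the steady rsp), the saved registers / the return address / the two stack arguments `[R − 48, R + 24)`, or a range of the stack
region above the return address (the callers' `len`, `p_left`). -/
def Protected (R a n : Nat) : Prop :=
  (R - 2940 ≤ a ∧ a + n ≤ R - 2928) ∨ (R - 2920 ≤ a ∧ a + n ≤ R - 2916) ∨ (R - 2904 ≤ a ∧ a + n ≤ R - 2872) ∨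
    (R - 48 ≤ a ∧ a + n ≤ R + 24) ∨ (R + 8 ≤ a ∧ a + n ≤ 0x800000)

/-- **A protected range reads the same after a batch of `SpanOK` stores.** Use it for a slot of your OWN assertion that happens
to be protected; for a scratch slot (`[0x8]`, `[0x20]`, `[0x48]`, `[0x54]`, `[0x58]` …) that your segment's stores do not meet,
use `hs.readLE a n (by omega) (fun w hw => …)` with `SpanOK.geom`, or simply `u_frame` on the walker's `w_mem`.
`ha` is closed by `by unfold Protected; omega` once the address is a number (`toNat_entry_sub`, `toNat_slot`). -/
theorem carry_read (h : DecodeInv others frames len Ar stored room ysz mem f) {R : Nat} {spans : List Span}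
    (hR1 : 0x700000 + 3856 ≤ R) (hR2 : R + 8 ≤ 0x800000) (hs : Mem.SameExcept spans mem mem')
    (hsp : ∀ w, w ∈ spans → SpanOK ysz mem R f w) (a : Word) (n : Nat) (ha : Protected R a.toNat n) :
    mem'.readLE a n = mem.readLE a n := by
  unfold Protected at ha
  apply hs.readLE a n (by omega)
  intro w hw
  obtain ⟨_, hg, hf⟩ := SpanOK.geom h hR1 hR2 (hsp w hw)
  rcases hg with hg | hg | ⟨g1, g2, g3, _⟩
  · omega
  · omega
  · omega

/-- **A part of `*f` outside the bit reader's windows reads the same after a batch of `SpanOK` stores** (`h3`: which of the five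
gaps between the windows `[48,56) [84,96) [136,144) [1484,1784)` the range `[lo, hi)` lies in). Then `.i32` / `.u8` / `.ptr` of the
`Mem.EqOn` read a field: `(carry_eqOn … f (f + 48) …).i32 _ (by omega) (by omega) (by omega)`. -/
theorem carry_eqOn (h : DecodeInv others frames len Ar stored room ysz mem f) {R : Nat} {spans : List Span}
    (hR1 : 0x700000 + 3856 ≤ R) (hR2 : R + 8 ≤ 0x800000) (hs : Mem.SameExcept spans mem mem')
    (hsp : ∀ w, w ∈ spans → SpanOK ysz mem R f w) (lo hi : Nat) (h1 : f ≤ lo) (h2 : hi ≤ f + 1808)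
    (h3 : hi ≤ f + 48 ∨ (f + 56 ≤ lo ∧ hi ≤ f + 84) ∨ (f + 96 ≤ lo ∧ hi ≤ f + 136) ∨ (f + 144 ≤ lo ∧ hi ≤ f + 1484) ∨
      f + 1784 ≤ lo) :
    Mem.EqOn lo hi mem mem' := by
  apply hs.eqOn
  intro w hw
  obtain ⟨_, hg, hf⟩ := SpanOK.geom h hR1 hR2 (hsp w hw)
  rcases hg with hg | hg | ⟨g1, g2, g3, _⟩
  · omega
  · omega
  · omega

/-- **A protected range agrees after a batch of `SpanOK` stores** (the `EqOn` form of `carry_read`, for `Mem.i32` / `Mem.u32`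
accessors at a `Nat` address: `(carry_eqOn_prot … (pLeftOf e) 4 ha).i32 _ (Nat.le_refl _) (Nat.le_refl _) (by omega)`). -/
theorem carry_eqOn_prot (h : DecodeInv others frames len Ar stored room ysz mem f) {R : Nat}
    {spans : List Span} (hR1 : 0x700000 + 3856 ≤ R) (hR2 : R + 8 ≤ 0x800000) (hs : Mem.SameExcept spans mem mem')
    (hsp : ∀ w, w ∈ spans → SpanOK ysz mem R f w) (lo n : Nat) (ha : Protected R lo n) :
    Mem.EqOn lo (lo + n) mem mem' := by
  unfold Protected at ha
  apply hs.eqOn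
  intro w hw
  obtain ⟨_, hg, hf⟩ := SpanOK.geom h hR1 hR2 (hsp w hw)
  rcases hg with hg | hg | ⟨g1, g2, g3, _⟩
  · omega
  · omega
  · omega

/-- **What the exit assertions read of `*f` is the same after a batch of `SpanOK` stores**: the channel count (`At2.i_le`,
`At3.i_lt`, `At8.rax`), `nOf` / `mapOf` of a mode record `m` inside `mode_config` (`At*.r13`, `slot_map`; for `m = mOf e` the
side conditions are `mode_record_inside`), the `finalY` pointers (`slot_finalY`), `IsFloor` (`At3.g`). Usage at an exit:
`obtain ⟨ech, emode, efy, efloor⟩ := config_carry hat.inv he_room he_top hs hsp`, then `rw [ech]`, `(emode (mOf e) hm.1 hm.2).2`. -/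
theorem config_carry (h : DecodeInv others frames len Ar stored room ysz mem f) {R : Nat} {spans : List Span}
    (hR1 : 0x700000 + 3856 ≤ R) (hR2 : R + 8 ≤ 0x800000) (hs : Mem.SameExcept spans mem mem')
    (hsp : ∀ w, w ∈ spans → SpanOK ysz mem R f w) :
    stb_vorbis.channels mem' f = stb_vorbis.channels mem f ∧
    (∀ m : Nat, f + 484 ≤ m → m + 6 ≤ f + 868 → nOf mem' f m = nOf mem f m ∧ mapOf mem' f m = mapOf mem f m) ∧
    (∀ c : Nat, c < 16 → stb_vorbis.finalY mem' f c = stb_vorbis.finalY mem f c) ∧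
    (∀ g : Nat, IsFloor mem f g → IsFloor mem' f g) := by
  have E1 := carry_eqOn h hR1 hR2 hs hsp f (f + 48) (Nat.le_refl _) (by omega) (by omega)
  have E2 := carry_eqOn h hR1 hR2 hs hsp (f + 144) (f + 1484) (by omega) (by omega) (by omega)
  have hf := (SpanOK.geom_obj h hR2)
  refine ⟨?_, ?_, ?_, ?_⟩
  · simp only [vacc, voff]
    exact E1.i32 _ (by omega) (by omega) (by omega)
  · intro m hm1 hm2
    have eb : Mode.blockflag mem' m = Mode.blockflag mem m := by
      simp only [vacc, voff]
      exact E2.u8 _ (by omega) (by omega) (by omega)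
    have em : Mode.mapping mem' m = Mode.mapping mem m := by
      simp only [vacc, voff]
      exact E2.u8 _ (by omega) (by omega) (by omega)
    have e0 : stb_vorbis.blocksize_0 mem' f = stb_vorbis.blocksize_0 mem f := by
      simp only [vacc, voff]
      exact E2.i32 _ (by omega) (by omega) (by omega)
    have e1 : stb_vorbis.blocksize_1 mem' f = stb_vorbis.blocksize_1 mem f := by
      simp only [vacc, voff]
      exact E2.i32 _ (by omega) (by omega) (by omega)
    have ep : stb_vorbis.mapping mem' f = stb_vorbis.mapping mem f := by
      simp only [vacc, voff]
      exact E2.ptr _ (by omega) (by omega) (by omega)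
    constructor
    · unfold nOf
      rw [eb]
      exact bsize_congr e0 e1 _
    · unfold mapOf
      rw [em]
      unfold stb_vorbis.mapping_at
      rw [ep]
  · intro c hc
    simp only [vacc, voff]
    exact E2.ptr _ (by omega) (by omega) (by omega)
  · intro g hg
    obtain ⟨i, hi, rfl⟩ := hg
    have ec : stb_vorbis.floor_count mem' f = stb_vorbis.floor_count mem f := by
      simp only [vacc, voff]
      exact E2.i32 _ (by omega) (by omega) (by omega)
    have ep : stb_vorbis.floor_config mem' f = stb_vorbis.floor_config mem f := by
      simp only [vacc, voff]
      exact E2.ptr _ (by omega) (by omega) (by omega)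
    refine ⟨i, by rw [ec]; exact hi, ?_⟩
    unfold stb_vorbis.floor_config_at
    rw [ep]

/-- **Every block the configuration reads is kept by a batch of `SpanOK` stores**: the floor block (`ConfigOK.Reads.floor`: then
`Floor1.partitions`, `Floor1.dimSum`, `partition_class_list`, `class_dimensions`, `Xlist`, `values` … of `At3 … At6` read the same:
`Block.Kept.i32 / .u8 / .ptr`), the codebooks block, the mapping table and the `chan` blocks, the residue tables. -/
theorem reads_carry (h : DecodeInv others frames len Ar stored room ysz mem f) {R : Nat} {spans : List Span}
    (hR1 : 0x700000 + 3856 ≤ R) (hR2 : R + 8 ≤ 0x800000) (hs : Mem.SameExcept spans mem mem')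
    (hsp : ∀ w, w ∈ spans → SpanOK ysz mem R f w) (B : Block) (hB : ConfigOK.Reads mem f B) : B.Kept mem mem' :=
  StoreOK.reads_kept h.config h.ok h.sep hs (fun w hw => (SpanOK.geom h hR1 hR2 (hsp w hw)).1) B hB

/-- **The mode record `m = &f->mode_config[mode]` lies inside `mode_config`** (MD1: `mode < mode_count ≤ 64`): the side conditions
of `config_carry`'s second clause for `m = mOf e`. `hpre` is `Frame.pre`. -/
theorem mode_record_inside {mode : Nat} {e : State}
    (hpre : (vorbis_decode_packet_rest.spec others frames len Ar stored room mode ysz).pre e) :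
    fOf e + 484 ≤ mOf e ∧ mOf e + 6 ≤ fOf e + 868 := by
  obtain ⟨_, hinv0, hargs⟩ := hpre
  have h1 := hargs.m_eq
  have h2 := hargs.mode_lt
  have h3 := (Real.VorbisOK.config hinv0.fb.vorbis).mode.MD1
  simp only [vacc, voff] at h1
  omega

/-- The number of a stack address `R − k` (`R` the entry stack pointer, inside the stack region). -/
theorem toNat_entry_sub (r : Word) (k : Nat) (hk : k ≤ 3856) (hR1 : 0x700000 + 3856 ≤ r.toNat) :
    (r - UInt64.ofNat k).toNat = r.toNat - k := by
  have hle : (UInt64.ofNat k) ≤ r := by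
    rw [UInt64.le_iff_toNat_le, UInt64.toNat_ofNat', Nat.mod_eq_of_lt (by omega)]
    omega
  rw [UInt64.toNat_sub_of_le _ _ hle, UInt64.toNat_ofNat', Nat.mod_eq_of_lt (by omega)]

/-- The number of the spill slot `[steady rsp + k]`: `(spOf e + k).toNat = R − 3000 + k`. -/
theorem toNat_slot (r : Word) (k : Nat) (hk : k ≤ 3000) (hR1 : 0x700000 + 3856 ≤ r.toNat) (hR2 : r.toNat + 8 ≤ 0x800000) :
    (r - 3000 + UInt64.ofNat k).toNat = r.toNat - 3000 + k := by
  have e1 : (r - 3000).toNat = r.toNat - 3000 := toNat_entry_sub r 3000 (by omega) hR1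
  rw [toNat_add_ofNat _ _ (by omega), e1]

/-- **STABLE at a state with the same memory** (a stretch that only computes in registers: segment .7 entry B, a branch arm without
a store): `Stable` speaks of the memory, `rsp`, DF and the MXCSR only. -/
theorem Stable.same_mem {u₀ e v s : State} {ret : Word} {ls : Int} {mode : Nat}
    (h : Stable u₀ others frames len Ar stored room mode ysz e ret ls v)
    (hm : s.mem = v.mem) (hrsp : s.reg .rsp = spOf e) (habi : abiInv s) :
    Stable u₀ others frames len Ar stored room mode ysz e ret ls s := by
  obtain ⟨⟨h1, h2, h3, h4, h5, h6, h7, h8, h9, h10, h11, h12, h13, h14, h15⟩, g1, g2, g3, g4, g5, g6, g7, g8, g9, g10, g11⟩ := h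
  simp only [slot64, slot32] at g1 g2 g3 g4 g5 g6 g7 g8
  rw [← hm] at h4 h6 h7 h8 h9 h10 h11 h12 h13 h14 h15 g1 g2 g3 g4 g5 g6 g7 g8 g9 g10 g11
  exact ⟨⟨h1, h2, hrsp, h4, habi, h6, h7, h8, h9, h10, h11, h12, h13, h14, h15⟩,
    g1, g2, g3, g4, g5, g6, g7, g8, g9, g10, g11⟩

set_option maxHeartbeats 4000000 in
/-- **STABLE IS CARRIED OVER A BATCH OF `SpanOK` STORES.**

WHEN: at every exit of a segment, and at every cut point after a callee's return, for the segments whose stores are scratch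
stores in the function's stack area, the bit reader's windows of `*f`, stores into `finalY[c]` / `channel_buffers[c]`, and which
write NO shadow byte (segments .2 – .8, .10, .11; see the section header for the others).

HOW: `hst` = `Stable` at the earlier cut point `v` (`hat.toStable`); `hs` = what was written since (`by u_same` on the walker's
`w_mem`; after a call: `Returned.same` composed by `Mem.SameExcept.step_same` / `.trans`); `hsp` = `SpanOK` for each span (the
constructors `SpanOK.below`, `SpanOK.of_winsBits`, `SpanOK.finalY`, `SpanOK.chan`, or the disjunct by hand); `hun` = `by v_untouched`
(after a call: the callee's `ShadowUntouched`, composed with `.trans`); `hrsp` = the walker's `w_rsp`; `hcode` = its `w_eq`;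
`habi` = `by v_inv`; `hbits` = `Bits` of the NEW memory: the bit reader's post if `*f` was written, otherwise
`hat.inv.fb.vorbis.bits.frame_fields (Bits.SameFields.of_same hobj)` with `hobj : (objBlock (fOf e)).Same v.mem s.mem := by apply
hs.eqOn; …`. The spans are judged in the memory of `v` (`SpanOK ysz v.mem …`): a pointer read at `v` need not be re-read.

The stack arguments `[R + 8, R + 24)` (`arg_re`, `arg_left`) are carried although the entry assertion bounds only `R + 8`:
`SpanOK.geom` puts every arena block at `≥ 0x800020`.

Example (the exit of segment .2 to .8 after the one check call):
```
have hs : Mem.SameExcept [⟨(e.reg .rsp).toNat - 3008, (e.reg .rsp).toNat - 3000⟩] v.mem s_1112e8.mem := by u_same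
have hsp : ∀ w, w ∈ [(⟨(e.reg .rsp).toNat - 3008, (e.reg .rsp).toNat - 3000⟩ : Span)] → SpanOK ysz v.mem (e.reg .rsp).toNat (fOf e) w := by
  intro w hw
  rw [List.mem_singleton.mp hw]
  exact SpanOK.below (by simp only []; omega) (by simp only []; omega)
have hst := Stable.carry hat.toStable hs hsp (by v_untouched) w_rsp w_eq (by v_inv) hbits
```
Elaboration: about 55 s for this lemma itself, a call of it is instant. -/
theorem Stable.carry {u₀ e v s : State} {ret : Word} {ls : Int} {mode : Nat}
    (hst : Stable u₀ others frames len Ar stored room mode ysz e ret ls v)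
    {spans : List Span} (hs : Mem.SameExcept spans v.mem s.mem)
    (hsp : ∀ w, w ∈ spans → SpanOK ysz v.mem (e.reg .rsp).toNat (fOf e) w)
    (hun : ShadowUntouched v.mem s.mem)
    (hrsp : s.reg .rsp = spOf e) (hcode : Vorbis.CodeOK u₀ s.mem) (habi : abiInv s)
    (hbits : Bits (RunBlk Ar len) len s.mem (fOf e)) :
    Stable u₀ others frames len Ar stored room mode ysz e ret ls s := by
  have hR1 : 0x700000 + 3856 ≤ (e.reg .rsp).toNat := hst.entry.room
  have hR2 : (e.reg .rsp).toNat + 8 ≤ 0x800000 := hst.entry.top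
  obtain ⟨hsh0, hinv0, hargs⟩ := hst.pre
  have hinv := hst.inv
  have hrd := carry_read hinv hR1 hR2 hs hsp
  obtain ⟨ech, emode, efy, _⟩ := config_carry hinv hR1 hR2 hs hsp
  obtain ⟨hobj, hobj'⟩ := SpanOK.geom_obj hinv hR2
  have hm := mode_record_inside hst.pre
  obtain ⟨en, _⟩ := emode (mOf e) hm.1 hm.2
  -- the configuration at the cut point `v` reads as at the entry: the sample buffers of the footprint
  obtain ⟨_, _, hd0⟩ := hinv0.config.frame_stores hinv0.ok hinv0.ob1 hinv0.sep hst.same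
    (fun w hw => footprint_storeOK hst.pre hR1 w hw)
  obtain ⟨ech0, ebs0, eptr0⟩ := ConfigOK.buffers_eq (hd0.sub ConfigOK.wins_decode) hinv0.config.header.HD1.2
  -- the slots, as numbers
  have hleft := (hargs.left_obj.1.above hsh0.inv)
  have hleft2 := hargs.left_obj.2
  have t8 : (e.reg .rsp - 8).toNat = (e.reg .rsp).toNat - 8 := toNat_entry_sub (e.reg .rsp) 8 (by omega) hR1
  have t16 : (e.reg .rsp - 16).toNat = (e.reg .rsp).toNat - 16 := toNat_entry_sub (e.reg .rsp) 16 (by omega) hR1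
  have t24 : (e.reg .rsp - 24).toNat = (e.reg .rsp).toNat - 24 := toNat_entry_sub (e.reg .rsp) 24 (by omega) hR1
  have t32 : (e.reg .rsp - 32).toNat = (e.reg .rsp).toNat - 32 := toNat_entry_sub (e.reg .rsp) 32 (by omega) hR1
  have t40 : (e.reg .rsp - 40).toNat = (e.reg .rsp).toNat - 40 := toNat_entry_sub (e.reg .rsp) 40 (by omega) hR1
  have t48 : (e.reg .rsp - 48).toNat = (e.reg .rsp).toNat - 48 := toNat_entry_sub (e.reg .rsp) 48 (by omega) hR1
  have a8 : (e.reg .rsp + 8).toNat = (e.reg .rsp).toNat + 8 := toNat_add_ofNat (e.reg .rsp) 8 (by omega)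
  have a16 : (e.reg .rsp + 16).toNat = (e.reg .rsp).toNat + 16 := toNat_add_ofNat (e.reg .rsp) 16 (by omega)
  have p3c : (spOf e + 0x3c).toNat = (e.reg .rsp).toNat - 3000 + 0x3c := toNat_slot (e.reg .rsp) 0x3c (by omega) hR1 hR2
  have p40 : (spOf e + 0x40).toNat = (e.reg .rsp).toNat - 3000 + 0x40 := toNat_slot (e.reg .rsp) 0x40 (by omega) hR1 hR2
  have p50 : (spOf e + 0x50).toNat = (e.reg .rsp).toNat - 3000 + 0x50 := toNat_slot (e.reg .rsp) 0x50 (by omega) hR1 hR2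
  have p60 : (spOf e + 0x60).toNat = (e.reg .rsp).toNat - 3000 + 0x60 := toNat_slot (e.reg .rsp) 0x60 (by omega) hR1 hR2
  have p68 : (spOf e + 0x68).toNat = (e.reg .rsp).toNat - 3000 + 0x68 := toNat_slot (e.reg .rsp) 0x68 (by omega) hR1 hR2
  have p70 : (spOf e + 0x70).toNat = (e.reg .rsp).toNat - 3000 + 0x70 := toNat_slot (e.reg .rsp) 0x70 (by omega) hR1 hR2
  have p78 : (spOf e + 0x78).toNat = (e.reg .rsp).toNat - 3000 + 0x78 := toNat_slot (e.reg .rsp) 0x78 (by omega) hR1 hR2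
  have p7c : (spOf e + 0x7c).toNat = (e.reg .rsp).toNat - 3000 + 0x7c := toNat_slot (e.reg .rsp) 0x7c (by omega) hR1 hR2
  refine
    { entry := hst.entry, pre := hst.pre, rsp := hrsp, code := hcode, abi := habi, same := ?same, ra := ?ra,
      s_r15 := ?s15, s_r14 := ?s14, s_r13 := ?s13, s_r12 := ?s12, s_rbp := ?sbp, s_rbx := ?sbx,
      shadow := hst.shadow.untouched hun, inv := ?inv,
      slot_f := ?slf, slot_len := ?sll, slot_m := ?slm, slot_ls := ?slls, slot_rs := ?slrs, slot_n := ?sln,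
      slot_n2 := ?sln2, slot_sb := ?slsb, arg_re := ?are, arg_left := ?ale, left_val := ?lv }
  case same =>
    apply hst.same.step_same hs
    intro w hw a h1 h2
    apply covered_footprint
    obtain ⟨_, hg, _⟩ := SpanOK.geom hinv hR1 hR2 (hsp w hw)
    rcases hg with hg | hg | ⟨_, _, _, _, ⟨c, hc, k1, k2, k3⟩ | ⟨c, hc, k1, k2, k3⟩⟩
    · exact Or.inl (by omega)
    · refine Or.inr (Or.inl ?_)
      unfold holes
      rcases hg with hg | hg | hg | hg
      · exact ⟨⟨fOf e + 48, fOf e + 56⟩, by simp only [List.mem_cons, true_or], by simp only []; omega, by simp only []; omega⟩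
      · exact ⟨⟨fOf e + 80, fOf e + 112⟩, by simp only [List.mem_cons, true_or, or_true], by simp only []; omega, by simp only []; omega⟩
      · exact ⟨⟨fOf e + 132, fOf e + 144⟩, by simp only [List.mem_cons, true_or, or_true], by simp only []; omega, by simp only []; omega⟩
      · exact ⟨⟨fOf e + 1480, fOf e + 1808⟩, by simp only [List.mem_cons, List.mem_nil_iff, or_false, or_true], by simp only []; omega, by simp only []; omega⟩
    · refine Or.inr (Or.inr (Or.inl ⟨c, ?_, ?_, ?_⟩))
      · rw [ech0] at hc
        unfold nchan
        omega
      · rw [ech0] at hc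
        rw [← (eptr0 c hc).2.2]
        omega
      · rw [ech0] at hc
        rw [← (eptr0 c hc).2.2]
        omega
    · refine Or.inr (Or.inr (Or.inr (Or.inl ⟨c, ?_, ?_, ?_⟩)))
      · rw [ech0] at hc
        unfold nchan
        omega
      · rw [ech0] at hc
        rw [← (eptr0 c hc).1]
        omega
      · rw [ech0] at hc
        rw [← (eptr0 c hc).1, ← ebs0]
        omega
  case inv =>
    have hf64 : fOf e + Off.sizeof.stb_vorbis ≤ 2 ^ 64 := by
      simp only [voff]
      omega
    apply hinv.frame_stores hs (fun w hw => (SpanOK.geom hinv hR1 hR2 (hsp w hw)).1)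
    · exact ⟨(hst.shadow.untouched hun).shadow.covers, hinv.ok, hinv.live⟩
    · apply ADO.frame_stores hinv.fb.ado hs hf64
      · intro w hw
        obtain ⟨_, hg, _⟩ := SpanOK.geom hinv hR1 hR2 (hsp w hw)
        rcases hg with hg | hg | ⟨g1, g2, g3, _⟩ <;> omega
      · intro w hw
        obtain ⟨_, hg, _⟩ := SpanOK.geom hinv hR1 hR2 (hsp w hw)
        rcases hg with hg | hg | ⟨g1, g2, g3, _⟩ <;> omega
    · exact fun _ => hbits
    · intro _
      apply hinv.fb.vorbis.buffers.M7.transfer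
      apply ObjEq.of_sameExcept hs
      · intro w hw
        simp only [Mdct.M7Range.wins, List.mem_cons, List.mem_nil_iff, or_false] at hw
        rcases hw with rfl | rfl <;> simp only [] <;> omega
      · intro w hw w' hw'
        obtain ⟨_, hg, _⟩ := SpanOK.geom hinv hR1 hR2 (hsp w' hw')
        simp only [Mdct.M7Range.wins, List.mem_cons, List.mem_nil_iff, or_false] at hw
        rcases hw with rfl | rfl <;> simp only [] <;> rcases hg with hg | hg | ⟨g1, g2, g3, _⟩ <;> omega
    · intro _
      apply hinv.fb.vorbis.w1.transfer
      apply ObjEq.of_sameExcept hs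
      · intro w hw
        simp only [W1.wins, List.mem_cons, List.mem_nil_iff, or_false] at hw
        rcases hw with rfl | rfl <;> simp only [] <;> omega
      · intro w hw w' hw'
        obtain ⟨_, hg, _⟩ := SpanOK.geom hinv hR1 hR2 (hsp w' hw')
        simp only [W1.wins, List.mem_cons, List.mem_nil_iff, or_false] at hw
        rcases hw with rfl | rfl <;> simp only [] <;> rcases hg with hg | hg | ⟨g1, g2, g3, _⟩ <;> omega
  case ra =>
    rw [hrd _ _ (by unfold Protected; omega)]
    exact hst.ra
  case s15 =>
    rw [hrd _ _ (by unfold Protected; omega)]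
    exact hst.s_r15
  case s14 =>
    rw [hrd _ _ (by unfold Protected; omega)]
    exact hst.s_r14
  case s13 =>
    rw [hrd _ _ (by unfold Protected; omega)]
    exact hst.s_r13
  case s12 =>
    rw [hrd _ _ (by unfold Protected; omega)]
    exact hst.s_r12
  case sbp =>
    rw [hrd _ _ (by unfold Protected; omega)]
    exact hst.s_rbp
  case sbx =>
    rw [hrd _ _ (by unfold Protected; omega)]
    exact hst.s_rbx
  case slf =>
    show s.mem.readLE (spOf e + 0x40) 8 = fOf e
    rw [hrd _ _ (by unfold Protected; omega)]
    exact hst.slot_f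
  case sll =>
    show s.mem.readLE (spOf e + 0x68) 8 = lenOf e
    rw [hrd _ _ (by unfold Protected; omega)]
    exact hst.slot_len
  case slm =>
    show s.mem.readLE (spOf e + 0x70) 8 = mOf e
    rw [hrd _ _ (by unfold Protected; omega)]
    exact hst.slot_m
  case slls =>
    show sint32 (s.mem.readLE (spOf e + 0x78) 4) = ls
    rw [hrd _ _ (by unfold Protected; omega)]
    exact hst.slot_ls
  case slrs =>
    show sint32 (s.mem.readLE (spOf e + 0x7c) 4) = rsOf e
    rw [hrd _ _ (by unfold Protected; omega)]
    exact hst.slot_rs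
  case sln =>
    show s.mem.readLE (spOf e + 0x50) 4 = nOf s.mem (fOf e) (mOf e)
    rw [hrd _ _ (by unfold Protected; omega), en]
    exact hst.slot_n
  case sln2 =>
    show s.mem.readLE (spOf e + 0x3c) 4 = nOf s.mem (fOf e) (mOf e) / 2
    rw [hrd _ _ (by unfold Protected; omega), en]
    exact hst.slot_n2
  case slsb =>
    show s.mem.readLE (spOf e + 0x60) 8 = sbOf e
    rw [hrd _ _ (by unfold Protected; omega)]
    exact hst.slot_sb
  case are =>
    rw [hrd _ _ (by unfold Protected; omega)]
    exact hst.arg_re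
  case ale =>
    rw [hrd _ _ (by unfold Protected; omega)]
    exact hst.arg_left
  case lv =>
    have hE := carry_eqOn_prot hinv hR1 hR2 hs hsp (pLeftOf e) 4 (by unfold Protected; omega)
    rw [← hst.left_val]
    exact hE.i32 _ (Nat.le_refl _) (Nat.le_refl _) (by omega)

/-! ### STABLE over a callee that writes shadow bytes or the arena's gap: `CallSpanOK`, `Stable.after_call`

`Stable.carry` rebuilds the shadow layer and `DecodeInv` itself, and therefore wants `SpanOK` stores and no shadow write. A PROTECTED
callee (decode_residue in .9) or one that allocates temp blocks (inverse_mdct in .12) writes shadow bytes and the arena's free gap; its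
POSTCONDITION hands the shadow layer and `DecodeInv` back. `Stable.after_call` takes the two from the caller of the lemma and rebuilds
the rest of `Stable` — `Frame.same`, the return address, the six saved registers, the eight STABLE slots, the two stack arguments,
`mem32[p_left]` — from the GEOMETRY of the spans alone (`CallSpanOK`: where a span may lie so that it meets none of them) and from
"every written byte is a byte of the function's footprint" (`Covered`). The two stack arguments `[R + 8, R + 24)` are read through a
footprint that is only known to be "off the stack region": this is where `Args.args_top` (from `Args.left_above`, freeze-7) is used.
(From the farm worker of vorbis_decode_packet_rest.9, attempt 1: its `stable_call`, generalised from decode_residue to any callee.) -/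

/-- **The configuration values the assertions mention** (`n`, `map` of the mode record `mode < 64`, the channel count) **read the same
in two memories in which the configuration's windows of `*f` read the same** (`ObjEq ConfigOK.wins`: what `ConfigOK.frame_stores`
gives for `Frame.same`, see `entry_objEq`). -/
theorem config_of_objEq {mem mem' : Mem} {f mode : Nat} (he : ObjEq ConfigOK.wins mem f mem' f) (hm : mode < 64) :
    nOf mem' f (stb_vorbis.mode_config_at f mode) = nOf mem f (stb_vorbis.mode_config_at f mode) ∧
    mapOf mem' f (stb_vorbis.mode_config_at f mode) = mapOf mem f (stb_vorbis.mode_config_at f mode) ∧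
    nchan mem' f = nchan mem f := by
  unfold nOf mapOf bsize nchan
  simp only [vacc, voff]
  have e1 := he.u8 (484 + 6 * mode + 0) (InWins.of_mem (144, 1000) (by decide) (by simp only []; omega) (by simp only []; omega))
  have e2 := he.u8 (484 + 6 * mode + 1) (InWins.of_mem (144, 1000) (by decide) (by simp only []; omega) (by simp only []; omega))
  have e3 := he.i32 152 (by decide)
  have e4 := he.i32 156 (by decide)
  have e5 := he.u64 472 (by decide)
  have e6 := he.i32 4 (by decide)
  simp only [← Nat.add_assoc] at e1 e2
  rw [e1, e2, e3, e4, e5, e6]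
  exact ⟨rfl, rfl, rfl⟩

/-- **The configuration's windows of `*f` read as at the function's entry** in every memory that differs from the entry memory
inside the function's footprint only (`Frame.same`). `hpre` = `Frame.pre`, `hroom` = `Frame.entry.room`. -/
theorem entry_objEq {mode : Nat} {u : State} {m : Mem}
    (hpre : (vorbis_decode_packet_rest.spec others frames len Ar stored room mode ysz).pre u)
    (hroom : 0x700000 + 3856 ≤ (u.reg .rsp).toNat)
    (hsame : Mem.SameExcept ((vorbis_decode_packet_rest.spec others frames len Ar stored room mode ysz).footprint u) u.mem m) :
    ObjEq ConfigOK.wins u.mem (fOf u) m (fOf u) := by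
  have hinv0 := hpre.2.1
  obtain ⟨_, _, hd⟩ := hinv0.config.frame_stores hinv0.ok hinv0.ob1 hinv0.sep hsame
    (fun s hs => footprint_storeOK hpre hroom s hs)
  exact hd.sub ConfigOK.wins_decode

/-- **Where a span written across a callee may lie** (`R` = the ENTRY rsp `(e.reg .rsp).toNat`) so that it meets no part of `Stable`:
below the STABLE slots (`w.hi ≤ R − 2940`: the return address of the call, the callee's frame, the scratch slots `[0x0, 0x3c)` —
and everything below the stack region), in the scratch slots `[0x48, 0x50)` or `[0x54, 0x60)`, in the function's frame objects
`[R − 2872, R − 48)`, or at or above 800000H (the arena — `*f`, the sample buffers, the free gap — and the shadow). -/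
def CallSpanOK (R : Nat) (w : Span) : Prop :=
  w.hi ≤ R - 2940 ∨ (R - 2928 ≤ w.lo ∧ w.hi ≤ R - 2920) ∨ (R - 2916 ≤ w.lo ∧ w.hi ≤ R - 2904) ∨
    (R - 2872 ≤ w.lo ∧ w.hi ≤ R - 48) ∨ 0x800000 ≤ w.lo

set_option maxHeartbeats 4000000 in
/-- **STABLE AFTER A CALLEE WHOSE POSTCONDITION GIVES THE SHADOW LAYER AND `DecodeInv` BACK.**

WHEN: after the return of decode_residue (.9), inverse_mdct (.12), flush_packet (.13) — callees whose footprint `Stable.carry` does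
not cover. HOW: `hst` = `Stable` at a state `p` before the call (steady rsp); `hs` = everything written between `p` and the state
`r` after the return (the segment's own stores up to the call composed with the callee's `Returned.same`:
`Mem.SameExcept.trans` after `.mono`, or `step_same`); `hgeo` = `CallSpanOK` per span (the callee's stack window ends at its entry
rsp `R − 3008`: first disjunct; its other spans are arena or shadow spans: last disjunct, from `DecodeInv.offStack` / `AR1x`);
`hcov` = every written byte is `Covered` (the `hsub` of `Frame.same`); `hshadow`, `hinv` = the callee's post; `hrsp`, `hcode`,
`habi` as for `Stable.carry`. Also returned: `mapOf` and the channel count read the same (for `At10.r15` and the loop heads). -/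
theorem Stable.after_call {u₀ e p r : State} {ret : Word} {ls : Int} {mode : Nat}
    (hst : Stable u₀ others frames len Ar stored room mode ysz e ret ls p)
    {spans : List Span} (hs : Mem.SameExcept spans p.mem r.mem)
    (hgeo : ∀ w, w ∈ spans → CallSpanOK (e.reg .rsp).toNat w)
    (hcov : ∀ w, w ∈ spans → ∀ a : Nat, w.lo ≤ a → a < w.hi → Covered Ar ysz e a)
    (hshadow : ShadowInv others (framesIn frames e) (spOf e).toNat r.mem)
    (hinv : DecodeInv others (framesIn frames e) len Ar stored room ysz r.mem (fOf e))
    (hrsp : r.reg .rsp = spOf e) (hcode : Vorbis.CodeOK u₀ r.mem) (habi : abiInv r) :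
    Stable u₀ others frames len Ar stored room mode ysz e ret ls r ∧
      mapOf r.mem (fOf e) (mOf e) = mapOf p.mem (fOf e) (mOf e) ∧
      nchan r.mem (fOf e) = nchan p.mem (fOf e) := by
  have hR1 : 0x700000 + 3856 ≤ (e.reg .rsp).toNat := hst.entry.room
  have hR2 : (e.reg .rsp).toNat + 8 ≤ 0x800000 := hst.entry.top
  obtain ⟨hsh0, hinv0, hargs⟩ := hst.pre
  have hR3 : (e.reg .rsp).toNat + 24 ≤ 0x800000 := hargs.args_top
  have hla : (e.reg .rsp).toNat + 24 ≤ pLeftOf e := hargs.left_above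
  have hl2 : pLeftOf e + 4 ≤ 0x800000 := hargs.left_obj.2.2
  -- a protected range reads the same
  have hrd : ∀ (a : Word) (n : Nat), Protected (e.reg .rsp).toNat a.toNat n → r.mem.readLE a n = p.mem.readLE a n := by
    intro a n ha
    unfold Protected at ha
    apply hs.readLE a n (by omega)
    intro w hw
    have hg := hgeo w hw
    unfold CallSpanOK at hg
    omega
  -- the footprint so far
  have hsame_r : Mem.SameExcept ((vorbis_decode_packet_rest.spec others frames len Ar stored room mode ysz).footprint e)
      e.mem r.mem := by
    apply hst.same.step_same hs
    intro w hw a h1 h2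
    exact covered_footprint _ _ _ _ _ _ _ _ _ _ (hcov w hw a h1 h2)
  -- the configuration values: both memories read as the entry memory
  have hmode : mode < 64 := ModeOK.mode_index_lt hinv0.fb.vorbis.mode hargs.mode_lt
  have cp := config_of_objEq (entry_objEq hst.pre hR1 hst.same) hmode
  have cr := config_of_objEq (entry_objEq hst.pre hR1 hsame_r) hmode
  rw [← hargs.m_eq] at cp cr
  obtain ⟨p1, p2, p3⟩ := cp
  obtain ⟨r1, r2, r3⟩ := cr
  have en : nOf r.mem (fOf e) (mOf e) = nOf p.mem (fOf e) (mOf e) := by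
    rw [r1, p1]
  -- the slots, as numbers
  have t8 : (e.reg .rsp - 8).toNat = (e.reg .rsp).toNat - 8 := toNat_entry_sub (e.reg .rsp) 8 (by omega) hR1
  have t16 : (e.reg .rsp - 16).toNat = (e.reg .rsp).toNat - 16 := toNat_entry_sub (e.reg .rsp) 16 (by omega) hR1
  have t24 : (e.reg .rsp - 24).toNat = (e.reg .rsp).toNat - 24 := toNat_entry_sub (e.reg .rsp) 24 (by omega) hR1
  have t32 : (e.reg .rsp - 32).toNat = (e.reg .rsp).toNat - 32 := toNat_entry_sub (e.reg .rsp) 32 (by omega) hR1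
  have t40 : (e.reg .rsp - 40).toNat = (e.reg .rsp).toNat - 40 := toNat_entry_sub (e.reg .rsp) 40 (by omega) hR1
  have t48 : (e.reg .rsp - 48).toNat = (e.reg .rsp).toNat - 48 := toNat_entry_sub (e.reg .rsp) 48 (by omega) hR1
  have a8 : (e.reg .rsp + 8).toNat = (e.reg .rsp).toNat + 8 := toNat_add_ofNat (e.reg .rsp) 8 (by omega)
  have a16 : (e.reg .rsp + 16).toNat = (e.reg .rsp).toNat + 16 := toNat_add_ofNat (e.reg .rsp) 16 (by omega)
  have p3c : (spOf e + 0x3c).toNat = (e.reg .rsp).toNat - 3000 + 0x3c := toNat_slot (e.reg .rsp) 0x3c (by omega) hR1 hR2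
  have p40 : (spOf e + 0x40).toNat = (e.reg .rsp).toNat - 3000 + 0x40 := toNat_slot (e.reg .rsp) 0x40 (by omega) hR1 hR2
  have p50 : (spOf e + 0x50).toNat = (e.reg .rsp).toNat - 3000 + 0x50 := toNat_slot (e.reg .rsp) 0x50 (by omega) hR1 hR2
  have p60 : (spOf e + 0x60).toNat = (e.reg .rsp).toNat - 3000 + 0x60 := toNat_slot (e.reg .rsp) 0x60 (by omega) hR1 hR2
  have p68 : (spOf e + 0x68).toNat = (e.reg .rsp).toNat - 3000 + 0x68 := toNat_slot (e.reg .rsp) 0x68 (by omega) hR1 hR2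
  have p70 : (spOf e + 0x70).toNat = (e.reg .rsp).toNat - 3000 + 0x70 := toNat_slot (e.reg .rsp) 0x70 (by omega) hR1 hR2
  have p78 : (spOf e + 0x78).toNat = (e.reg .rsp).toNat - 3000 + 0x78 := toNat_slot (e.reg .rsp) 0x78 (by omega) hR1 hR2
  have p7c : (spOf e + 0x7c).toNat = (e.reg .rsp).toNat - 3000 + 0x7c := toNat_slot (e.reg .rsp) 0x7c (by omega) hR1 hR2
  refine ⟨?stable, ?map, ?chan⟩
  case map =>
    rw [r2, p2]
  case chan =>
    rw [r3, p3]
  case stable =>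
    refine
      { entry := hst.entry, pre := hst.pre, rsp := hrsp, code := hcode, abi := habi, same := hsame_r, ra := ?ra,
        s_r15 := ?s15, s_r14 := ?s14, s_r13 := ?s13, s_r12 := ?s12, s_rbp := ?sbp, s_rbx := ?sbx,
        shadow := hshadow, inv := hinv,
        slot_f := ?slf, slot_len := ?sll, slot_m := ?slm, slot_ls := ?slls, slot_rs := ?slrs, slot_n := ?sln,
        slot_n2 := ?sln2, slot_sb := ?slsb, arg_re := ?are, arg_left := ?ale, left_val := ?lv }
    case ra =>
      rw [hrd _ _ (by unfold Protected; omega)]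
      exact hst.ra
    case s15 =>
      rw [hrd _ _ (by unfold Protected; omega)]
      exact hst.s_r15
    case s14 =>
      rw [hrd _ _ (by unfold Protected; omega)]
      exact hst.s_r14
    case s13 =>
      rw [hrd _ _ (by unfold Protected; omega)]
      exact hst.s_r13
    case s12 =>
      rw [hrd _ _ (by unfold Protected; omega)]
      exact hst.s_r12
    case sbp =>
      rw [hrd _ _ (by unfold Protected; omega)]
      exact hst.s_rbp
    case sbx =>
      rw [hrd _ _ (by unfold Protected; omega)]
      exact hst.s_rbx
    case slf =>
      show r.mem.readLE (spOf e + 0x40) 8 = fOf e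
      rw [hrd _ _ (by unfold Protected; omega)]
      exact hst.slot_f
    case sll =>
      show r.mem.readLE (spOf e + 0x68) 8 = lenOf e
      rw [hrd _ _ (by unfold Protected; omega)]
      exact hst.slot_len
    case slm =>
      show r.mem.readLE (spOf e + 0x70) 8 = mOf e
      rw [hrd _ _ (by unfold Protected; omega)]
      exact hst.slot_m
    case slls =>
      show sint32 (r.mem.readLE (spOf e + 0x78) 4) = ls
      rw [hrd _ _ (by unfold Protected; omega)]
      exact hst.slot_ls
    case slrs =>
      show sint32 (r.mem.readLE (spOf e + 0x7c) 4) = rsOf e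
      rw [hrd _ _ (by unfold Protected; omega)]
      exact hst.slot_rs
    case sln =>
      show r.mem.readLE (spOf e + 0x50) 4 = nOf r.mem (fOf e) (mOf e)
      rw [hrd _ _ (by unfold Protected; omega), en]
      exact hst.slot_n
    case sln2 =>
      show r.mem.readLE (spOf e + 0x3c) 4 = nOf r.mem (fOf e) (mOf e) / 2
      rw [hrd _ _ (by unfold Protected; omega), en]
      exact hst.slot_n2
    case slsb =>
      show r.mem.readLE (spOf e + 0x60) 8 = sbOf e
      rw [hrd _ _ (by unfold Protected; omega)]
      exact hst.slot_sb
    case are =>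
      rw [hrd _ _ (by unfold Protected; omega)]
      exact hst.arg_re
    case ale =>
      rw [hrd _ _ (by unfold Protected; omega)]
      exact hst.arg_left
    case lv =>
      have hE : Mem.EqOn (pLeftOf e) (pLeftOf e + 4) p.mem r.mem := by
        apply hs.eqOn
        intro w hw
        have hg := hgeo w hw
        unfold CallSpanOK at hg
        omega
      rw [← hst.left_val]
      exact hE.i32 _ (Nat.le_refl _) (Nat.le_refl _) (by omega)

end Vorbis.Spec.vorbis_decode_packet_rest
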